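-- pv_equiv track=rewrite | github.com/zhuxiangqun/RANGEN-V2 | src/core/reasoning/reasoning_orchestrator/dynamic_knowledge_manager.py | _is_obviously_irrelevant
-- ===== SOURCE A (Python) =====
-- def _is_obviously_irrelevant(query: str, content: str) -> bool:
--     """检查是否明显不相关（硬过滤规则）"""
--     query_lower = query.lower()
--     content_lower = content.lower()
--
--     # 如果查询是关于"第一夫人"的，但内容是关于"埃菲尔铁塔"的
--     if ('lady' in query_lower or 'president' in query_lower or 'first' in query_lower) and 'tower' in content_lower:
--         return True
--
--     # 如果查询是关于"母亲"的，但内容是关于"建筑"的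
--     if 'mother' in query_lower and ('building' in content_lower or 'tower' in content_lower or 'bridge' in content_lower):
--         return True
--
--     # 如果查询包含数字，但内容完全不相关
--     if any(char.isdigit() for char in query) and not any(char.isdigit() for char in content):
--         # 检查是否有共同的数字
--         query_nums = [int(''.join(filter(str.isdigit, word))) for word in query.split() if any(char.isdigit() for char in word)]
--         content_nums = [int(''.join(filter(str.isdigit, word))) for word in content.split() if any(char.isdigit() for char in word)]
--
--         if query_nums and content_nums and not set(query_nums) & set(content_nums):
--             return True
--
--     return False
-- ===== SOURCE B (Python) =====
-- RULES = [
--     (('lady', 'president', 'first'), ('tower',)),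
--     (('mother',), ('building', 'tower', 'bridge')),
-- ]
--
--
-- def _is_obviously_irrelevant(query: str, content: str) -> bool:
--     query_lower = query.lower()
--     content_lower = content.lower()
--     return any(
--         any(q in query_lower for q in qs) and any(c in content_lower for c in cs)
--         for qs, cs in RULES
--     )
-- ===== Notes on version B (the rewrite author's own statement) =====
-- stated objective: simpler
-- what changed: B replaces A's hard-coded branch chain by one loop over a data-driven rule table and drops A's entire digit-comparison block, which is dead code (under its own guard the content side never contains a digit, so content_nums is always empty and the condition never fires).
import Mathlib
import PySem

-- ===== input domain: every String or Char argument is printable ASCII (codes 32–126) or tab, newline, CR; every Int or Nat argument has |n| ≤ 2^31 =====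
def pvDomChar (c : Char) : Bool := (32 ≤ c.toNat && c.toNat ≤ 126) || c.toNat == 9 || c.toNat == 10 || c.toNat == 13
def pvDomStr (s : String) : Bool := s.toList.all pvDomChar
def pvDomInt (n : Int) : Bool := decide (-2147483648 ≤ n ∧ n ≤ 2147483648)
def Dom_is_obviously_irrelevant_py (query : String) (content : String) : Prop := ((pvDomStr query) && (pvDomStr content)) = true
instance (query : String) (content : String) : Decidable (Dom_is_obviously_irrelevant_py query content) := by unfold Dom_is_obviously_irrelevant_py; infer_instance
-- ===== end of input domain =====

-- B replaces A's branch chain by a loop over a small rule table and drops A's digit block,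
-- which is dead code (under its own guard content_nums is always empty), making B simpler.

-- ===== PORT A =====
-- int(''.join(filter(str.isdigit, word))): the word is kept only if it has a digit, so the
-- digit string is nonempty and int() never raises; '.getD 0' is never taken.
def pvWordNum (w : List Char) : Int :=
  (PySem.Int.ofChars? (w.filter PySem.Chars.isdigit)).getD 0

def is_obviously_irrelevant_py (query : String) (content : String) : Bool :=
  let query_lower := PySem.Str.lower query
  let content_lower := PySem.Str.lower content
  if (PySem.Str.isIn "lady" query_lower || PySem.Str.isIn "president" query_lower
      || PySem.Str.isIn "first" query_lower) && PySem.Str.isIn "tower" content_lower then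
    true
  else if PySem.Str.isIn "mother" query_lower
      && (PySem.Str.isIn "building" content_lower || PySem.Str.isIn "tower" content_lower
          || PySem.Str.isIn "bridge" content_lower) then
    true
  else if query.toList.any PySem.Chars.isdigit && !(content.toList.any PySem.Chars.isdigit) then
    let query_nums := ((PySem.Chars.split₀ query.toList).filter
        (fun w => w.any PySem.Chars.isdigit)).map pvWordNum
    let content_nums := ((PySem.Chars.split₀ content.toList).filter
        (fun w => w.any PySem.Chars.isdigit)).map pvWordNum
    if !query_nums.isEmpty && !content_nums.isEmpty
        && (PySem.Set.inter (PySem.Set.ofList query_nums) (PySem.Set.ofList content_nums)).isEmpty then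
      true
    else
      false
  else
    false

-- ===== PORT B =====
def pvRules : List (List String × List String) :=
  [(["lady", "president", "first"], ["tower"]),
   (["mother"], ["building", "tower", "bridge"])]

def is_obviously_irrelevant_py_alt (query : String) (content : String) : Bool :=
  let query_lower := PySem.Str.lower query
  let content_lower := PySem.Str.lower content
  pvRules.any (fun r =>
    r.1.any (fun q => PySem.Str.isIn q query_lower)
    && r.2.any (fun c => PySem.Str.isIn c content_lower))

-- ===== PRECONDITION & SPEC =====
def Spec_is_obviously_irrelevant_py (query : String) (content : String) (out : Bool) : Prop := out = is_obviously_irrelevant_py_alt query content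
instance (query : String) (content : String) (out : Bool) : Decidable (Spec_is_obviously_irrelevant_py query content out) := by unfold Spec_is_obviously_irrelevant_py; infer_instance

-- ===== CLAIM (what is proved, stated in full; the proofs are below) =====
def Claim_equal_is_obviously_irrelevant_py : Prop := ∀ (query : String) (content : String), Dom_is_obviously_irrelevant_py query content → Spec_is_obviously_irrelevant_py query content (is_obviously_irrelevant_py query content)

-- ===== LEMMAS AND PROOFS =====

-- Every character of every word produced by split₀.go comes from the input s, cur or acc.
theorem split0_go_no_digit (s cur : List Char) (acc : List (List Char))
    (hs : ∀ c ∈ s, PySem.Chars.isdigit c = false)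
    (hcur : ∀ c ∈ cur, PySem.Chars.isdigit c = false)
    (hacc : ∀ w ∈ acc, ∀ c ∈ w, PySem.Chars.isdigit c = false) :
    ∀ w ∈ PySem.Chars.split₀.go s cur acc, ∀ c ∈ w, PySem.Chars.isdigit c = false := by
  induction s generalizing cur acc with
  | nil =>
    intro w hw
    unfold PySem.Chars.split₀.go at hw
    split at hw
    · exact hacc w (List.mem_reverse.mp hw)
    · rcases List.mem_cons.mp (List.mem_reverse.mp hw) with h | h
      · subst h; intro c hc; exact hcur c (List.mem_reverse.mp hc)
      · exact hacc w h
  | cons a t ih =>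
    intro w hw
    unfold PySem.Chars.split₀.go at hw
    have ha : PySem.Chars.isdigit a = false := hs a List.mem_cons_self
    have ht : ∀ c ∈ t, PySem.Chars.isdigit c = false :=
      fun c hc => hs c (List.mem_cons_of_mem a hc)
    split at hw
    · split at hw
      · exact ih [] acc ht (by simp) hacc w hw
      · refine ih [] (cur.reverse :: acc) ht (by simp) ?_ w hw
        intro v hv
        rcases List.mem_cons.mp hv with h | h
        · subst h; intro c hc; exact hcur c (List.mem_reverse.mp hc)
        · exact hacc v h
    · refine ih (a :: cur) acc ht ?_ hacc w hw
      intro c hc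
      rcases List.mem_cons.mp hc with h | h
      · subst h; exact ha
      · exact hcur c h

-- If content has no digit character, no word of content.split() contains a digit.
theorem content_nums_nil (cs : List Char) (h : cs.any PySem.Chars.isdigit = false) :
    (PySem.Chars.split₀ cs).filter (fun w => w.any PySem.Chars.isdigit) = [] := by
  apply List.filter_eq_nil_iff.mpr
  intro w hw
  have hcs : ∀ c ∈ cs, PySem.Chars.isdigit c = false := by
    intro c hc
    simpa using List.any_eq_false.mp h c hc
  have hmem : w ∈ PySem.Chars.split₀.go cs [] [] := hw
  have hno := split0_go_no_digit cs [] [] hcs (by simp) (by simp) w hmem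
  intro hT
  obtain ⟨c, hc, hcd⟩ := List.any_eq_true.mp hT
  simp [hno c hc] at hcd

-- ===== VERDICT (by name: the statement is the Claim_ definition above) =====
theorem is_obviously_irrelevant_py_spec : Claim_equal_is_obviously_irrelevant_py := by
  intro query content _
  unfold Spec_is_obviously_irrelevant_py
  have halt : is_obviously_irrelevant_py_alt query content =
      ((PySem.Str.isIn "lady" (PySem.Str.lower query)
          || PySem.Str.isIn "president" (PySem.Str.lower query)
          || PySem.Str.isIn "first" (PySem.Str.lower query))
        && PySem.Str.isIn "tower" (PySem.Str.lower content)
      || PySem.Str.isIn "mother" (PySem.Str.lower query)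
        && (PySem.Str.isIn "building" (PySem.Str.lower content)
          || PySem.Str.isIn "tower" (PySem.Str.lower content)
          || PySem.Str.isIn "bridge" (PySem.Str.lower content))) := by
    simp [is_obviously_irrelevant_py_alt, pvRules, Bool.or_assoc]
  rw [halt]
  simp only [is_obviously_irrelevant_py]
  split_ifs with h1 h2 h3 h4
  · exact (Bool.or_eq_true_iff.mpr (Or.inl h1)).symm
  · exact (Bool.or_eq_true_iff.mpr (Or.inr h2)).symm
  · -- digit block taken: content has no digit, so content_nums = [] and the inner test h4 is absurd
    exfalso
    have hc : content.toList.any PySem.Chars.isdigit = false := by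
      simp only [Bool.and_eq_true, Bool.not_eq_true'] at h3
      exact h3.2
    rw [content_nums_nil content.toList hc] at h4
    simp at h4
  · symm
    rw [Bool.or_eq_false_iff]
    exact ⟨Bool.not_eq_true _ ▸ (Bool.eq_false_iff.mpr h1), Bool.eq_false_iff.mpr h2⟩
  · symm
    rw [Bool.or_eq_false_iff]
    exact ⟨Bool.eq_false_iff.mpr h1, Bool.eq_false_iff.mpr h2⟩
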